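-- pv_equiv track=rewrite | github.com/iandioch/adapt | fiontar_txt_cleaning/remove_linebreaks.py | remove_weird_newlines
-- ===== SOURCE A (Python) =====
-- def remove_weird_newlines(inp):
--     out = []
--     curr = []
--     for line in inp:
--         line = line.strip()
--         if len(line):
--             curr.append(line)
--         if len(line) and line[-1] == '.':
--             cs = ' '.join(curr)
--             out.append(cs)
--             curr = []
--     return '\n'.join(out)
-- ===== SOURCE B (Python) =====
-- def remove_weird_newlines(inp):
--     lines = [s for s in (l.strip() for l in inp) if s]
--     out = []
--     while True:
--         k = next((i for i, s in enumerate(lines) if s.endswith('.')), None)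
--         if k is None:
--             break
--         out.append(' '.join(lines[:k + 1]))
--         lines = lines[k + 1:]
--     return '\n'.join(out)
-- ===== Notes on version B (the rewrite author's own statement) =====
-- stated objective: alternative
-- what changed: B first strips and filters all lines, then repeatedly finds the next '.'-terminated line and slices out whole sentence groups, instead of A's single pass with a running per-line accumulation buffer.
import Mathlib
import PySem

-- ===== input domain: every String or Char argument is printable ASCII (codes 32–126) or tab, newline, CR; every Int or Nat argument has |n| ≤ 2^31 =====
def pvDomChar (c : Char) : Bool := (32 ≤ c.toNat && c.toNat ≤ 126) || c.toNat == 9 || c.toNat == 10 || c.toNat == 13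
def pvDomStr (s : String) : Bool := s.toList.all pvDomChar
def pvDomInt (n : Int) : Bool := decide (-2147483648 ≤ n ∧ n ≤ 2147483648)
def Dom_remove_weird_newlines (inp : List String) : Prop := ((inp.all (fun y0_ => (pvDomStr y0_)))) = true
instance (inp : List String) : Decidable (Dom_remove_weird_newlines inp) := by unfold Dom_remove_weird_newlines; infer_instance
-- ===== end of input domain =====

-- B rebuilds sentences by repeated find-next-terminator-and-slice over the pre-filtered lines, instead of A's single pass with a running buffer; same return value.

-- ===== PORT A =====
-- loop body of A, one step of the fold over the input lines
def pvStepA (st : List String × List String) (line : String) : List String × List String :=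
  let line := PySem.Str.strip line
  let curr := if PySem.Str.len line ≠ 0 then st.2 ++ [line] else st.2
  if PySem.Str.len line ≠ 0 ∧ PySem.Str.pyGet? line (-1) = some '.' then
    (st.1 ++ [PySem.Str.join " " curr], [])
  else
    (st.1, curr)

def remove_weird_newlines (inp : List String) : String :=
  PySem.Str.join "\n" (inp.foldl pvStepA ([], [])).1

-- ===== PORT B =====
-- the while loop of B: find the first '.'-terminated line, emit the slice up to it, continue on the rest
def pvGroups (lines : List String) : List String :=
  match h : lines.findIdx? (fun s => PySem.Str.endswith s ".") with
  | none => []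
  | some k =>
      PySem.Str.join " " (lines.take (k + 1)) :: pvGroups (lines.drop (k + 1))
termination_by lines.length
decreasing_by
  have hk := List.findIdx?_eq_some_iff_findIdx_eq.mp h
  simp [List.length_drop]; omega

def remove_weird_newlines_alt (inp : List String) : String :=
  let lines := (inp.map PySem.Str.strip).filter (fun s => s != "")
  PySem.Str.join "\n" (pvGroups lines)

-- ===== PRECONDITION & SPEC =====
def Spec_remove_weird_newlines (inp : List String) (out : String) : Prop := out = remove_weird_newlines_alt inp
instance (inp : List String) (out : String) : Decidable (Spec_remove_weird_newlines inp out) := by unfold Spec_remove_weird_newlines; infer_instance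

-- ===== CLAIM (what is proved, stated in full; the proofs are below) =====
def Claim_equal_remove_weird_newlines : Prop := ∀ (inp : List String), Dom_remove_weird_newlines inp → Spec_remove_weird_newlines inp (remove_weird_newlines inp)

-- ===== LEMMAS AND PROOFS =====

-- the step of A restricted to already-stripped nonempty lines
def pvStepN (st : List String × List String) (l : String) : List String × List String :=
  if PySem.Str.endswith l "." then (st.1 ++ [PySem.Str.join " " (st.2 ++ [l])], [])
  else (st.1, st.2 ++ [l])

-- pvGroups with a pending buffer in front of the first group
def pvGAux (curr : List String) (lines : List String) : List String :=
  match lines.findIdx? (fun s => PySem.Str.endswith s ".") with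
  | none => []
  | some k =>
      PySem.Str.join " " (curr ++ lines.take (k + 1)) :: pvGroups (lines.drop (k + 1))

lemma pvGroups_eq_gAux (lines : List String) : pvGroups lines = pvGAux [] lines := by
  unfold pvGroups pvGAux
  cases h : lines.findIdx? (fun s => PySem.Str.endswith s ".") <;> simp

lemma str_len_ne_zero {s : String} (h : s ≠ "") : PySem.Str.len s ≠ 0 := by
  intro h0
  apply h
  have h1 : s.toList = [] := by
    have := h0
    simp [PySem.Str.len] at this
    simpa using this
  exact String.toList_eq_nil_iff.mp h1

lemma endswith_dot_iff (l : String) :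
    PySem.Str.endswith l "." = true ↔ PySem.Str.pyGet? l (-1) = some '.' := by
  simp only [PySem.Str.endswith_eq, PySem.Str.pyGet?_eq, PySem.Chars.pyGet?_eq_listPyGet?,
    PySem.List.pyGet?_neg_one]
  rw [PySem.Chars.endswith_iff]
  have hdot : (".").toList = ['.'] := rfl
  rw [hdot]
  constructor
  · rintro ⟨t, ht⟩
    rw [← ht]
    simp
  · intro h
    obtain ⟨ys, hy⟩ := List.getLast?_eq_some_iff.mp h
    exact ⟨ys, hy.symm⟩

lemma stepA_eq_stepN (st : List String × List String) (line : String) :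
    pvStepA st line =
      if PySem.Str.strip line = "" then st else pvStepN st (PySem.Str.strip line) := by
  by_cases h : PySem.Str.strip line = ""
  · rw [if_pos h]
    unfold pvStepA
    simp [h, PySem.Str.len]
  · rw [if_neg h]
    unfold pvStepA pvStepN
    simp only []
    have hlen : PySem.Str.len (PySem.Str.strip line) ≠ 0 := str_len_ne_zero h
    rw [if_pos hlen]
    by_cases he : PySem.Str.endswith (PySem.Str.strip line) "." = true
    · rw [if_pos ⟨hlen, (endswith_dot_iff _).mp he⟩, if_pos he]
    · rw [if_neg (fun hc => he ((endswith_dot_iff _).mpr hc.2)), if_neg he]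

lemma foldl_stepA_eq (inp : List String) (st : List String × List String) :
    inp.foldl pvStepA st =
      (((inp.map PySem.Str.strip).filter (fun s => s != "")).foldl pvStepN st) := by
  induction inp generalizing st with
  | nil => simp
  | cons a l ih =>
    rw [List.foldl_cons, List.map_cons, List.filter_cons, stepA_eq_stepN]
    by_cases h : PySem.Str.strip a = ""
    · rw [if_pos h, ih]
      have hb : (PySem.Str.strip a != "") = false := by simp [h]
      rw [hb]
      simp
    · rw [if_neg h, ih]
      have hb : (PySem.Str.strip a != "") = true := by simpa using h
      rw [hb]
      simp

lemma foldl_stepN_fst (lines : List String) (out curr : List String) :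
    (lines.foldl pvStepN (out, curr)).1 = out ++ pvGAux curr lines := by
  induction lines generalizing out curr with
  | nil => simp [pvGAux]
  | cons a l ih =>
    rw [List.foldl_cons]
    by_cases h : PySem.Str.endswith a "." = true
    · have hf : (a :: l).findIdx? (fun s => PySem.Str.endswith s ".") = some 0 := by
        rw [List.findIdx?_cons, if_pos h]
      have hs : pvStepN (out, curr) a = (out ++ [PySem.Str.join " " (curr ++ [a])], []) := by
        rw [pvStepN, if_pos h]
      rw [hs, ih, ← pvGroups_eq_gAux]
      unfold pvGAux
      rw [hf]
      simp
    · have hf : (a :: l).findIdx? (fun s => PySem.Str.endswith s ".") =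
          (l.findIdx? (fun s => PySem.Str.endswith s ".")).map (· + 1) := by
        rw [List.findIdx?_cons, if_neg h]
      have hs : pvStepN (out, curr) a = (out, curr ++ [a]) := by
        rw [pvStepN, if_neg h]
      rw [hs, ih]
      congr 1
      unfold pvGAux
      rw [hf]
      cases hk : l.findIdx? (fun s => PySem.Str.endswith s ".") with
      | none => simp
      | some k => simp [List.take_succ_cons, List.drop_succ_cons]

-- ===== VERDICT (by name: the statement is the Claim_ definition above) =====
theorem remove_weird_newlines_spec : Claim_equal_remove_weird_newlines := by
  intro inp _
  unfold Spec_remove_weird_newlines remove_weird_newlines remove_weird_newlines_alt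
  rw [foldl_stepA_eq, foldl_stepN_fst]
  show PySem.Str.join "\n" ([] ++ pvGAux [] _) = PySem.Str.join "\n" (pvGroups _)
  rw [pvGroups_eq_gAux, List.nil_append]
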